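-- pv_equiv track=rewrite | github.com/rocke2020/AutoNER | preprocess_partial_ner/encode_folder.py | read_corpus
-- ===== SOURCE A (Python) =====
-- def read_corpus(lines):
--     features, gap_labels, gap_ids, type_labels = list(), list(), list(), list()
--
--     tmp_tokens, tmp_gap_ids, tmp_gap_labels, tmp_type_lst = list(), list(), list(), list()
--
--     for line in lines:
--         if not (line.isspace() or (len(line) > 10 and line[0:10] == '-DOCSTART-')):
--             line = line.rstrip('\n').split()
--
--             assert len(line) == 3, "the format of corpus"
--             # The format should be
--             # 0. Token
--             # 1. I/O (I means Break, O means Connected)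
--             # 2. Type (separated by comma)
--             token = line[0]
--             chunk_gap = line[1]
--             entity_types = line[2]
--
--             tmp_tokens.append(token)
--             tmp_gap_labels.append(chunk_gap)
--             if 'I' == chunk_gap:
--                 tmp_gap_ids.append(1)
--                 tmp_type_lst.append(entity_types)
--             else:
--                 tmp_gap_ids.append(0)
--         elif len(tmp_tokens) > 0:
--             features.append(tmp_tokens)
--             gap_labels.append(tmp_gap_labels)
--             gap_ids.append(tmp_gap_ids)
--             type_labels.append(tmp_type_lst)
--             tmp_tokens, tmp_gap_ids, tmp_gap_labels, tmp_type_lst = list(), list(), list(), list()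
--
--     if len(tmp_tokens) > 0:
--         features.append(tmp_tokens)
--         gap_labels.append(tmp_gap_labels)
--         gap_ids.append(tmp_gap_ids)
--         type_labels.append(tmp_type_lst)
--
--     return features, gap_labels, gap_ids, type_labels
-- ===== SOURCE B (Python) =====
-- def read_corpus(lines):
--     def is_sep(line):
--         return line.isspace() or (len(line) > 10 and line[0:10] == '-DOCSTART-')
--
--     # phase 1: segment the lines into non-empty blocks of consecutive content lines
--     blocks, cur = [], []
--     for line in lines:
--         if is_sep(line):
--             if cur:
--                 blocks.append(cur)
--                 cur = []
--         else:
--             cur.append(line)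
--     if cur:
--         blocks.append(cur)
--
--     # phase 2: transform each block into its four per-sentence lists
--     features, gap_labels, gap_ids, type_labels = [], [], [], []
--     for block in blocks:
--         toks, glabels, gids, types = [], [], [], []
--         for line in block:
--             parts = line.rstrip('\n').split()
--             assert len(parts) == 3, "the format of corpus"
--             toks.append(parts[0])
--             glabels.append(parts[1])
--             if parts[1] == 'I':
--                 gids.append(1)
--                 types.append(parts[2])
--             else:
--                 gids.append(0)
--         features.append(toks)
--         gap_labels.append(glabels)
--         gap_ids.append(gids)
--         type_labels.append(types)
--     return features, gap_labels, gap_ids, type_labels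
-- ===== Notes on version B (the rewrite author's own statement) =====
-- stated objective: alternative
-- what changed: Replaces the flush-on-separator four-list accumulator with a two-phase computation: one pass segments the lines into non-empty blocks of consecutive content lines, then each block is independently transformed into its four per-sentence lists.
import Mathlib
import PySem

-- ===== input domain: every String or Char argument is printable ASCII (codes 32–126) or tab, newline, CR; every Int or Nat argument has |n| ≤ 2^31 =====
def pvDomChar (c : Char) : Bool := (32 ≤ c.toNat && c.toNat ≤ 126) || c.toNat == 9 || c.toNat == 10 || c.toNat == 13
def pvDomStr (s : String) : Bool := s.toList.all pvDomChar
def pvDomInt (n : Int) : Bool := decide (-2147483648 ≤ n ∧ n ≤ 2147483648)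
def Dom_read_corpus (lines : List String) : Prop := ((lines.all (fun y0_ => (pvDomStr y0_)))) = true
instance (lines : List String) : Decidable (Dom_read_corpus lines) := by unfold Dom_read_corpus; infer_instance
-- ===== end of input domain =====

-- B replaces A's flush-on-separator accumulator with a two-phase segment-then-transform
-- computation over the same lines (objective: alternative decomposition, same cost).


-- ===== PORT A =====
-- exact port of line.rstrip('\n') (PySem has no rstrip-with-argument; exact for every string)
def pvRstripNl (s : String) : String :=
  String.ofList ((s.toList.reverse.dropWhile (· == '\n')).reverse)

-- the separator test 'line.isspace() or (len(line) > 10 and line[0:10] == "-DOCSTART-")',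
-- identical in both Pythons (A writes it inline, Source B as the helper is_sep)
def pvIsSep (line : String) : Bool :=
  PySem.Str.strIsspace line ||
    (decide (10 < PySem.Str.len line) && (PySem.Str.slice line (some 0) (some 10) == "-DOCSTART-"))

-- shared 'append the four tmp lists to the four output lists' (both Pythons do these four appends)
def pvApp4 (out : List (List String) × List (List String) × List (List Int) × List (List String))
    (t : List String × List String × List Int × List String) :
    List (List String) × List (List String) × List (List Int) × List (List String) :=
  (out.1 ++ [t.1], out.2.1 ++ [t.2.1], out.2.2.1 ++ [t.2.2.1], out.2.2.2 ++ [t.2.2.2])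

-- A's loop body; on a content line the 'assert len(line) == 3' raises outside Pre_,
-- so the field reads are ported with pyGetD "" (never reached inside Pre_)
def pvStepA (st : (List (List String) × List (List String) × List (List Int) × List (List String)) ×
    (List String × List String × List Int × List String)) (line : String) :
    (List (List String) × List (List String) × List (List Int) × List (List String)) ×
    (List String × List String × List Int × List String) :=
  if pvIsSep line = false then
    let parts := PySem.Str.split₀ (pvRstripNl line)
    let token := PySem.List.pyGetD parts 0 ""
    let chunk_gap := PySem.List.pyGetD parts 1 ""
    let entity_types := PySem.List.pyGetD parts 2 ""
    (st.1, (st.2.1 ++ [token], st.2.2.1 ++ [chunk_gap],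
            if "I" == chunk_gap then st.2.2.2.1 ++ [1] else st.2.2.2.1 ++ [0],
            if "I" == chunk_gap then st.2.2.2.2 ++ [entity_types] else st.2.2.2.2))
  else if st.2.1.length > 0 then (pvApp4 st.1 st.2, ([], [], [], []))
  else st

def read_corpus (lines : List String) :
    List (List String) × List (List String) × List (List Int) × List (List String) :=
  let st := lines.foldl pvStepA (([], [], [], []), ([], [], [], []))
  if st.2.1.length > 0 then pvApp4 st.1 st.2 else st.1

-- ===== PORT B =====
-- phase 1 loop body of Source B: close the current block on a separator, else extend it
def pvSegStep (p : List (List String) × List String) (line : String) :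
    List (List String) × List String :=
  if pvIsSep line then (if p.2.isEmpty then p else (p.1 ++ [p.2], []))
  else (p.1, p.2 ++ [line])

def pvFin (p : List (List String) × List String) : List (List String) :=
  if p.2.isEmpty then p.1 else p.1 ++ [p.2]

def pvBlocks (lines : List String) : List (List String) :=
  pvFin (lines.foldl pvSegStep ([], []))

-- inner loop body of Source B's phase 2 (assert ported as in A: pyGetD "", unreached inside Pre_)
def pvLineStepB (t : List String × List String × List Int × List String) (line : String) :
    List String × List String × List Int × List String :=
  let parts := PySem.Str.split₀ (pvRstripNl line)
  (t.1 ++ [PySem.List.pyGetD parts 0 ""],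
   t.2.1 ++ [PySem.List.pyGetD parts 1 ""],
   if PySem.List.pyGetD parts 1 "" == "I" then t.2.2.1 ++ [1] else t.2.2.1 ++ [0],
   if PySem.List.pyGetD parts 1 "" == "I" then t.2.2.2 ++ [PySem.List.pyGetD parts 2 ""] else t.2.2.2)

def pvTransBlock (block : List String) : List String × List String × List Int × List String :=
  block.foldl pvLineStepB ([], [], [], [])

def pvOutFold (out : List (List String) × List (List String) × List (List Int) × List (List String))
    (bs : List (List String)) :
    List (List String) × List (List String) × List (List Int) × List (List String) :=
  bs.foldl (fun o b => pvApp4 o (pvTransBlock b)) out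

def read_corpus_alt (lines : List String) :
    List (List String) × List (List String) × List (List Int) × List (List String) :=
  pvOutFold ([], [], [], []) (pvBlocks lines)

-- ===== PRECONDITION & SPEC =====
-- Pre_ excludes exactly the inputs where A's 'assert len(line) == 3' raises AssertionError:
-- some non-separator line does not split into exactly three whitespace-separated fields.
def Pre_read_corpus (lines : List String) : Prop :=
  ∀ line ∈ lines, pvIsSep line = false → (PySem.Str.split₀ (pvRstripNl line)).length = 3
instance (lines : List String) : Decidable (Pre_read_corpus lines) := by
  unfold Pre_read_corpus; infer_instance

def pvWitness_read_corpus : List String :=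
  ["Peter I PER", " ", "ran O O", "fast I LOC,ORG"]

def Spec_read_corpus (lines : List String)
    (out : List (List String) × List (List String) × List (List Int) × List (List String)) : Prop :=
  out = read_corpus_alt lines
instance (lines : List String)
    (out : List (List String) × List (List String) × List (List Int) × List (List String)) :
    Decidable (Spec_read_corpus lines out) := by unfold Spec_read_corpus; infer_instance

-- ===== CLAIM (what is proved, stated in full; the proofs are below) =====
def Claim_equal_read_corpus : Prop := ∀ (lines : List String), Dom_read_corpus lines →
  Pre_read_corpus lines → Spec_read_corpus lines (read_corpus lines)

-- ===== LEMMAS AND PROOFS =====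

-- every content line contributes exactly one token, so the block accumulator is
-- nonempty iff its source block of lines is nonempty
theorem pv_len_trans (block : List String)
    (acc : List String × List String × List Int × List String) :
    ((block.foldl pvLineStepB acc).1).length = acc.1.length + block.length := by
  induction block generalizing acc with
  | nil => simp
  | cons l rest ih =>
      simp only [List.foldl_cons, ih, pvLineStepB]
      simp; omega

theorem pv_trans_nil_iff (cur : List String) :
    ((pvTransBlock cur).1.length > 0) ↔ cur ≠ [] := by
  have h := pv_len_trans cur ([], [], [], [])
  unfold pvTransBlock
  rw [h]
  simp [List.length_pos_iff]

theorem pv_stepA_content (st : (List (List String) × List (List String) × List (List Int) ×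
    List (List String)) × (List String × List String × List Int × List String))
    (line : String) (h : pvIsSep line = false) :
    pvStepA st line = (st.1, pvLineStepB st.2 line) := by
  by_cases hI : PySem.List.pyGetD (PySem.Str.split₀ (pvRstripNl line)) 1 "" = "I"
  · simp [pvStepA, pvLineStepB, h, hI]
  · have h1 : ("I" == PySem.List.pyGetD (PySem.Str.split₀ (pvRstripNl line)) 1 "") = false := by
      simpa [beq_iff_eq] using fun e => hI e.symm
    have h2 : (PySem.List.pyGetD (PySem.Str.split₀ (pvRstripNl line)) 1 "" == "I") = false := by
      simpa [beq_iff_eq] using hI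
    simp [pvStepA, pvLineStepB, h, h1, h2]

theorem pv_trans_snoc (cur : List String) (l : String) :
    pvTransBlock (cur ++ [l]) = pvLineStepB (pvTransBlock cur) l := by
  simp [pvTransBlock, List.foldl_append]

theorem pv_seg_prefix (lines : List String) (bs : List (List String)) (cur : List String) :
    lines.foldl pvSegStep (bs, cur)
      = (bs ++ (lines.foldl pvSegStep ([], cur)).1, (lines.foldl pvSegStep ([], cur)).2) := by
  induction lines generalizing bs cur with
  | nil => simp
  | cons l rest ih =>
      simp only [List.foldl_cons]
      by_cases h : pvIsSep l = true
      · by_cases hc : cur.isEmpty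
        · have e : ∀ b : List (List String), pvSegStep (b, cur) l = (b, cur) := fun b => by
            simp [pvSegStep, h, hc]
          rw [e, e]; exact ih bs cur
        · have e : ∀ b : List (List String), pvSegStep (b, cur) l = (b ++ [cur], []) :=
            fun b => by simp [pvSegStep, h, hc]
          rw [e, e, ih (bs ++ [cur]) [], ih ([] ++ [cur]) []]
          simp
      · have e : ∀ b : List (List String), pvSegStep (b, cur) l = (b, cur ++ [l]) := fun b => by
          simp [pvSegStep, h]
        rw [e, e]; exact ih bs (cur ++ [l])

theorem pv_fin_cons (b : List String) (bs : List (List String)) (c : List String) :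
    pvFin (b :: bs, c) = b :: pvFin (bs, c) := by
  unfold pvFin; by_cases h : c.isEmpty <;> simp [h]

theorem pv_main (lines : List String)
    (out : List (List String) × List (List String) × List (List Int) × List (List String))
    (cur : List String) :
    (let st := lines.foldl pvStepA (out, pvTransBlock cur)
     if st.2.1.length > 0 then pvApp4 st.1 st.2 else st.1)
      = pvOutFold out (pvFin (lines.foldl pvSegStep ([], cur))) := by
  induction lines generalizing out cur with
  | nil =>
      simp only [List.foldl_nil, pvFin]
      by_cases hc : cur.isEmpty
      · have hcn : cur = [] := by simpa [List.isEmpty_iff] using hc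
        subst hcn
        simp [pvTransBlock, pvOutFold]
      · have hne : cur ≠ [] := by simpa [List.isEmpty_iff] using hc
        have hp := (pv_trans_nil_iff cur).mpr hne
        rw [if_pos hp]
        simp [hc, pvOutFold]
  | cons l rest ih =>
      simp only [List.foldl_cons]
      by_cases h : pvIsSep l = true
      · by_cases hc : cur.isEmpty
        · have hcn : cur = [] := by simpa [List.isEmpty_iff] using hc
          subst hcn
          have hA : pvStepA (out, pvTransBlock []) l = (out, pvTransBlock []) := by
            simp [pvStepA, pvTransBlock, h]
          have hB : pvSegStep ([], []) l = ([], []) := by simp [pvSegStep, h]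
          rw [hA, hB]
          exact ih out []
        · have hne : cur ≠ [] := by simpa [List.isEmpty_iff] using hc
          have hp := (pv_trans_nil_iff cur).mpr hne
          have hA : pvStepA (out, pvTransBlock cur) l
              = (pvApp4 out (pvTransBlock cur), ([], [], [], [])) := by
            simp [pvStepA, h, hp]
          have hB : pvSegStep ([], cur) l = ([cur], []) := by
            simp [pvSegStep, h, hc]
          rw [hA, hB]
          have hTnil : (([], [], [], []) : List String × List String × List Int × List String)
              = pvTransBlock [] := by simp [pvTransBlock]
          rw [hTnil, ih (pvApp4 out (pvTransBlock cur)) []]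
          rw [pv_seg_prefix rest [cur] []]
          simp only [List.singleton_append]
          rw [pv_fin_cons]
          simp [pvOutFold]
      · have h' : pvIsSep l = false := by simpa using h
        rw [pv_stepA_content (out, pvTransBlock cur) l h']
        rw [(pv_trans_snoc cur l).symm]
        have hB : pvSegStep ([], cur) l = ([], cur ++ [l]) := by
          simp [pvSegStep, h']
        rw [hB]
        exact ih out (cur ++ [l])

-- ===== VERDICT (by name: the statement is the Claim_ definition above) =====
theorem read_corpus_spec : Claim_equal_read_corpus := by
  intro lines _ _
  unfold Spec_read_corpus read_corpus read_corpus_alt pvBlocks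
  have := pv_main lines (([], [], [], [])) []
  simpa [pvTransBlock] using this
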